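-- pv_equiv track=rewrite | github.com/gitmengzh/leetcode | competition/competition_272_03.py | getDescentPeriods2
-- ===== SOURCE A (Python) =====
-- def getDescentPeriods2(prices):
--     n = len(prices)
--     res = n
--     l = 0
--     r = 1
--     while r < n:
--         if prices[r - 1] - 1 == prices[r]:
--             res += (r - l)
--         else:
--             l = r
--         r += 1
--     return res
-- ===== SOURCE B (Python) =====
-- def getDescentPeriods2(prices):
--     if not prices:
--         return 0
--     total = 0
--     run = 1
--     for prev, cur in zip(prices, prices[1:]):
--         if prev - 1 == cur:
--             run += 1
--         else:
--             total += run * (run + 1) // 2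
--             run = 1
--     return total + run * (run + 1) // 2
-- ===== Notes on version B (the rewrite author's own statement) =====
-- stated objective: alternative
-- what changed: B partitions the array into maximal descend-by-one runs and adds the triangular closed form run*(run+1)//2 per run, instead of A's two-index (l,r) loop that starts from res=n and accumulates r-l at every step.
import Mathlib
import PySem

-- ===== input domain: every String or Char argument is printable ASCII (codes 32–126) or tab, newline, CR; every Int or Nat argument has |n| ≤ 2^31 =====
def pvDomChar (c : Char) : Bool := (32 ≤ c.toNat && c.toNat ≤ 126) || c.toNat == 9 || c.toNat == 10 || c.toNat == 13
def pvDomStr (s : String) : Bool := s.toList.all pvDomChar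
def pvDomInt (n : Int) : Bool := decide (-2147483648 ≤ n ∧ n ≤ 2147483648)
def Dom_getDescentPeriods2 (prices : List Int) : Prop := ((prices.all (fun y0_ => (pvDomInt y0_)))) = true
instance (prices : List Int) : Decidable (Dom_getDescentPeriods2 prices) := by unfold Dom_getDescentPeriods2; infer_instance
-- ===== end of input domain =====

-- B replaces A's two-index (l, r) incremental accumulation (starting from res = n) by a
-- run-length scan over consecutive pairs with a triangular closed form per maximal run
-- (objective: alternative decomposition, same O(n) cost).

-- ===== PORT A =====
-- the while loop of A; indices r-1 and r are always in range when read (1 ≤ r < n),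
-- so the `.getD 0` default on pyGet? is never taken and the port is exact
def getDescentPeriods2Loop (prices : List Int) (l r res : Int) : Int :=
  if r < (prices.length : Int) then
    if (PySem.List.pyGet? prices (r - 1)).getD 0 - 1 = (PySem.List.pyGet? prices r).getD 0 then
      getDescentPeriods2Loop prices l (r + 1) (res + (r - l))
    else
      getDescentPeriods2Loop prices r (r + 1) res
  else res
termination_by ((prices.length : Int) - r).toNat
decreasing_by all_goals omega

def getDescentPeriods2 (prices : List Int) : Int :=
  getDescentPeriods2Loop prices 0 1 (prices.length : Int)

-- ===== PORT B =====
-- run * (run + 1) // 2 with Python floor division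
def pvTri (run : Int) : Int := PySem.Int.floordiv (run * (run + 1)) 2

-- body of the for-loop over zip(prices, prices[1:]); state = (total, run)
def pvStep : (Int × Int) → (Int × Int) → (Int × Int)
  | (total, run), (prev, cur) =>
    if prev - 1 = cur then (total, run + 1) else (total + pvTri run, 1)

def getDescentPeriods2_alt (prices : List Int) : Int :=
  if prices = [] then 0
  else
    let p := (prices.zip (PySem.List.slice prices (some 1) none)).foldl pvStep (0, 1)
    p.1 + pvTri p.2

-- ===== PRECONDITION & SPEC =====
def Spec_getDescentPeriods2 (prices : List Int) (out : Int) : Prop := out = getDescentPeriods2_alt prices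
instance (prices : List Int) (out : Int) : Decidable (Spec_getDescentPeriods2 prices out) := by unfold Spec_getDescentPeriods2; infer_instance

-- ===== CLAIM (what is proved, stated in full; the proofs are below) =====
def Claim_equal_getDescentPeriods2 : Prop := ∀ (prices : List Int), Dom_getDescentPeriods2 prices → Spec_getDescentPeriods2 prices (getDescentPeriods2 prices)

-- ===== LEMMAS AND PROOFS =====

-- common characterisation: the extra count accumulated along a suffix, given the previous
-- element and the length of the current run
def pvExtra : List Int → Int → Int → Int
  | [], _, _ => 0
  | x :: rest, prev, run =>
    if prev - 1 = x then run + pvExtra rest x (run + 1) else pvExtra rest x 1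

theorem pvTri_succ (k : Int) : pvTri (k + 1) = pvTri k + (k + 1) := by
  obtain ⟨m, hm⟩ := Int.even_mul_succ_self k
  have h1 : k * (k + 1) = 2 * m := by omega
  have e : (k + 1) * (k + 1 + 1) = k * (k + 1) + 2 * (k + 1) := by ring
  rw [pvTri, pvTri]
  simp only [PySem.Int.floordiv_eq_ediv_of_pos (show (0:Int) < 2 by omega)]
  generalize hA : k * (k + 1) = A at h1 e
  generalize hB : (k + 1) * (k + 1 + 1) = B at e
  omega

theorem pvStep_foldl (xs : List Int) : ∀ (prev total run : Int),
    (let p := ((prev :: xs).zip xs).foldl pvStep (total, run); p.1 + pvTri p.2)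
      = total + pvTri run + (xs.length : Int) + pvExtra xs prev run := by
  induction xs with
  | nil => intro prev total run; simp [pvExtra]
  | cons x t ih =>
    intro prev total run
    simp only [List.zip_cons_cons, List.foldl_cons, pvStep, pvExtra]
    split
    · rw [ih]
      rw [pvTri_succ]
      simp only [List.length_cons]
      push_cast
      omega
    · rw [ih]
      have : pvTri 1 = 1 := by decide
      rw [this]
      simp only [List.length_cons]
      push_cast
      omega

theorem aLoop_eq (xs : List Int) : ∀ (prices : List Int) (l r res prev : Int),
    1 ≤ r → prices.drop r.toNat = xs →
    PySem.List.pyGet? prices (r - 1) = some prev →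
    getDescentPeriods2Loop prices l r res = res + pvExtra xs prev (r - l) := by
  induction xs with
  | nil =>
    intro prices l r res prev hr hdrop _
    have hlen : prices.length ≤ r.toNat := by
      have := List.drop_eq_nil_iff.mp hdrop
      omega
    rw [getDescentPeriods2Loop]
    rw [if_neg (by omega)]
    simp [pvExtra]
  | cons x t ih =>
    intro prices l r res prev hr hdrop hprev
    have hrlt : r.toNat < prices.length := by
      by_contra h
      rw [List.drop_eq_nil_of_le (by omega)] at hdrop
      exact List.cons_ne_nil _ _ hdrop.symm
    have hx : PySem.List.pyGet? prices r = some x := by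
      have h0r : (0:Int) ≤ r := by omega
      rw [PySem.List.pyGet?_of_nonneg prices h0r]
      rw [List.getElem?_eq_getElem hrlt]
      have : prices[r.toNat] = (prices.drop r.toNat).head (by simp [hdrop]) := by
        simp [List.head_drop]
      rw [this]
      simp [hdrop]
    have hdrop' : prices.drop (r + 1).toNat = t := by
      have : (r + 1).toNat = r.toNat + 1 := by omega
      rw [this, ← List.drop_drop]
      simp [hdrop]
    have hprev' : PySem.List.pyGet? prices (r + 1 - 1) = some x := by
      simpa using hx
    rw [getDescentPeriods2Loop]
    rw [if_pos (by omega)]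
    rw [hprev, hx]
    simp only [Option.getD_some]
    by_cases hcase : prev - 1 = x
    · rw [if_pos hcase]
      rw [ih prices l (r + 1) (res + (r - l)) x (by omega) hdrop' hprev']
      simp only [pvExtra, if_pos hcase]
      rw [show r + 1 - l = r - l + 1 from by ring]
      omega
    · rw [if_neg hcase]
      rw [ih prices r (r + 1) res x (by omega) hdrop' hprev']
      have e1 : r + 1 - r = (1:Int) := by omega
      simp only [pvExtra, if_neg hcase, e1]

-- ===== VERDICT (by name: the statement is the Claim_ definition above) =====
theorem getDescentPeriods2_spec : Claim_equal_getDescentPeriods2 := by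
  intro prices _
  unfold Spec_getDescentPeriods2
  match prices with
  | [] =>
    rw [getDescentPeriods2, getDescentPeriods2Loop]
    simp [getDescentPeriods2_alt]
  | x :: xs =>
    have h0 : PySem.List.pyGet? (x :: xs) (1 - 1) = some x := by
      norm_num [PySem.List.pyGet?_zero]
    rw [getDescentPeriods2]
    rw [aLoop_eq xs (x :: xs) 0 1 ((x :: xs).length : Int) x (by omega) (by simp) h0]
    have hslice : PySem.List.slice (x :: xs) (some 1) none = xs := by
      simp [PySem.List.slice_from]
    rw [getDescentPeriods2_alt, if_neg (List.cons_ne_nil x xs), hslice]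
    rw [pvStep_foldl xs x 0 1]
    have : pvTri 1 = 1 := by decide
    rw [this]
    simp only [List.length_cons]
    push_cast
    omega
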